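-- pv_equiv track=rewrite | github.com/satyam8254/Python-program | python-code/grovlyeString.py | GrovlyeString
-- ===== SOURCE A (Python) =====
-- def GrovlyeString(s):
--     s=sorted(s,reverse=True)
--     mid=len(s)//2
--     res=[""]*len(s)
--     res[mid]=s[0]
--     left=mid-1
--     right=mid+1
--     for i in range(1,len(s)):
--         if(i%2==0):
--             res[left]=s[i]
--             left=left-1
--         else:
--             res[right]=s[i]
--             right=right+1
--     return "".join(res)
-- ===== SOURCE B (Python) =====
-- def GrovlyeString(s):
--     d = sorted(s, reverse=True)
--     return "".join(d[2::2][::-1] + [d[0]] + d[1::2])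
-- ===== Notes on version B (the rewrite author's own statement) =====
-- stated objective: simpler
-- what changed: Replaces the preallocated result array with left/right pointers and a parity test by a direct construction from three slices of the sorted list: reversed d[2::2], the center d[0], and d[1::2], concatenated and joined.
import Mathlib
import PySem

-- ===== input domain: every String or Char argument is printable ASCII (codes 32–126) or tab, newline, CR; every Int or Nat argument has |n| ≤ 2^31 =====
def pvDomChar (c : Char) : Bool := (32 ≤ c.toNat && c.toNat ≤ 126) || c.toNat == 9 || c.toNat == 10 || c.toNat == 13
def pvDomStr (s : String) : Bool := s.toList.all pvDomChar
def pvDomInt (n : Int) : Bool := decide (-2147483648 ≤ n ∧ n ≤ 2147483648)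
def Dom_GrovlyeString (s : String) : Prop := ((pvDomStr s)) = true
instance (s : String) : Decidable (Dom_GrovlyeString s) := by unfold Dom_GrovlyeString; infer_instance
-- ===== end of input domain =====

-- B replaces A's preallocated array with left/right pointers and a parity test by a
-- direct slice-and-concatenate construction of the same result (objective: simpler).

-- ===== PORT A =====
-- res = [""]*len(s) is modeled as a char array of placeholders ' '; on every admitted
-- (odd-length) input each slot is overwritten exactly once, so the placeholder is never read.
def GrovlyeString (s : String) : String :=
  let d := PySem.List.sorted s.toList (fun c => c) true
  let n : Int := (d.length : Int)
  let mid : Int := PySem.Int.floordiv n 2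
  let res0 : List Char := PySem.List.pySetD (List.replicate d.length ' ') mid (PySem.List.pyGetD d 0 ' ')
  let st := (PySem.List.pyRange 1 n 1).foldl
    (fun (st : List Char × Int × Int) i =>
      let res := st.1; let left := st.2.1; let right := st.2.2
      if PySem.Int.mod i 2 = 0 then
        (PySem.List.pySetD res left (PySem.List.pyGetD d i ' '), left - 1, right)
      else
        (PySem.List.pySetD res right (PySem.List.pyGetD d i ' '), left, right + 1))
    (res0, mid - 1, mid + 1)
  String.ofList st.1

-- ===== PORT B =====
def GrovlyeString_alt (s : String) : String :=
  let d := PySem.List.sorted s.toList (fun c => c) true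
  let leftPart := ((PySem.List.slice? d (some 2) none 2).getD []).reverse   -- d[2::2][::-1]
  let rightPart := (PySem.List.slice? d (some 1) none 2).getD []           -- d[1::2]
  String.ofList (leftPart ++ [PySem.List.pyGetD d 0 ' '] ++ rightPart)

-- ===== PRECONDITION & SPEC =====
-- A raises IndexError on every even-length string (s[0] on the empty string; on even
-- length ≥ 2 the right pointer steps past the end); Pre_ admits exactly the odd lengths.
def Pre_GrovlyeString (s : String) : Prop := s.toList.length % 2 = 1
instance (s : String) : Decidable (Pre_GrovlyeString s) := by unfold Pre_GrovlyeString; infer_instance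
def pvWitness_GrovlyeString : String := "hello"

def Spec_GrovlyeString (s : String) (out : String) : Prop := out = GrovlyeString_alt s
instance (s : String) (out : String) : Decidable (Spec_GrovlyeString s out) := by unfold Spec_GrovlyeString; infer_instance

-- ===== CLAIM (what is proved, stated in full; the proofs are below) =====
def Claim_equal_GrovlyeString : Prop := ∀ (s : String), Dom_GrovlyeString s → Pre_GrovlyeString s → Spec_GrovlyeString s (GrovlyeString s)

-- ===== LEMMAS AND PROOFS =====

def pvEO {α : Type} : List α → List α
  | [] => []
  | [a] => [a]
  | a :: _ :: t => a :: pvEO t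

theorem pvEO_length {α : Type} (l : List α) : (pvEO l).length = (l.length + 1) / 2 := by
  fun_induction pvEO l <;> (simp_all; try omega)

theorem pvEO_getElem? {α : Type} (l : List α) (j : Nat) : (pvEO l)[j]? = l[2 * j]? := by
  induction l using pvEO.induct generalizing j with
  | case1 => simp [pvEO]
  | case2 a => cases j with
    | zero => simp [pvEO]
    | succ j => simp [pvEO]
  | case3 a b t ih =>
    cases j with
    | zero => simp [pvEO]
    | succ j =>
      have h2 : 2 * (j + 1) = 2 * j + 1 + 1 := by omega
      simp only [pvEO, List.getElem?_cons_succ, h2, ih]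

theorem set_append_len {α : Type} (A B : List α) (x v : α) :
    (A ++ x :: B).set A.length v = A ++ v :: B := by
  induction A with
  | nil => simp
  | cons a A ih => simp [List.set_cons_succ, ih]

theorem set_repl_suffix {α : Type} (A : List α) (r : Nat) (x v : α) (hr : 1 ≤ r) :
    (A ++ List.replicate r x).set A.length v = A ++ v :: List.replicate (r - 1) x := by
  conv_lhs => rw [show r = (r - 1) + 1 by omega, List.replicate_succ, set_append_len]

theorem set_repl_prefix {α : Type} (B : List α) (r : Nat) (x v : α) :
    (List.replicate (r + 1) x ++ B).set r v = List.replicate r x ++ v :: B := by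
  have h1 : List.replicate (r + 1) x ++ B = List.replicate r x ++ x :: B := by
    rw [List.replicate_succ', List.append_assoc]
    simp
  calc (List.replicate (r + 1) x ++ B).set r v
      = (List.replicate r x ++ x :: B).set (List.replicate r x).length v := by
        rw [h1]
        congr 1
        simp
    _ = List.replicate r x ++ v :: B := set_append_len _ _ _ _

theorem pvEO_eq_filterMap {α : Type} (l : List α) :
    pvEO l = (List.range ((l.length + 1) / 2)).filterMap (fun k => l[2 * k]?) := by
  fun_induction pvEO l with
  | case1 => simp
  | case2 a => simp
  | case3 a b t ih =>
    have hlen : ((a :: b :: t).length + 1) / 2 = (t.length + 1) / 2 + 1 := by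
      simp; omega
    rw [hlen, List.range_succ_eq_map]
    rw [List.filterMap_cons, List.filterMap_map]
    have h2 : ((fun k => (a :: b :: t)[2 * k]?) ∘ Nat.succ) = (fun k : Nat => t[2 * k]?) := by
      funext k
      show (a :: b :: t)[2 * (k + 1)]? = t[2 * k]?
      have : 2 * (k + 1) = 2 * k + 1 + 1 := by omega
      rw [this, List.getElem?_cons_succ, List.getElem?_cons_succ]
    rw [h2, ← ih]
    simp

theorem slice2_eq_pvEO {α : Type} (xs : List α) (a : Nat) :
    PySem.List.slice? xs (some (a : Int)) none 2 = some (pvEO (xs.drop a)) := by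
  simp only [PySem.List.slice?, PySem.List.sliceIndices]
  norm_num
  set n := xs.length with hn
  have hneg : ¬((a : Int) < 0) := by omega
  simp only [if_neg hneg]
  set s' := min a n with hs'
  have hmin : min (a : Int) (n : Int) = (s' : Int) := by omega
  rw [hmin]
  have hdrop : xs.drop a = xs.drop s' := by
    rcases le_or_gt a n with h | h
    · simp [hs', Nat.min_eq_left h]
    · have h1 : xs.drop a = [] := List.drop_eq_nil_of_le (by omega)
      have h2 : xs.drop s' = [] := List.drop_eq_nil_of_le (by omega)
      rw [h1, h2]
  have hcount : (if (s' : Int) < (n : Int) then (((n : Int) - (s' : Int) + 2 - 1) / 2).toNat else 0)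
      = (n - s' + 1) / 2 := by
    split_ifs with h <;> omega
  rw [hcount, hdrop, pvEO_eq_filterMap]
  have hlen : (xs.drop s').length = n - s' := by simp [hn]
  rw [hlen]
  apply List.filterMap_congr
  intro k hk
  rw [List.getElem?_drop]
  congr 1

theorem loop_inv (d : List Char) (m : Nat) (hlen : d.length = 2 * m + 1)
    (k : Nat) (hk : k ≤ 2 * m) :
    (PySem.List.pyRange 1 (1 + (k : Int)) 1).foldl
      (fun (st : List Char × Int × Int) i =>
        let res := st.1; let left := st.2.1; let right := st.2.2
        if PySem.Int.mod i 2 = 0 then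
          (PySem.List.pySetD res left (PySem.List.pyGetD d i ' '), left - 1, right)
        else
          (PySem.List.pySetD res right (PySem.List.pyGetD d i ' '), left, right + 1))
      (PySem.List.pySetD (List.replicate d.length ' ') ((m : Nat) : Int) (PySem.List.pyGetD d 0 ' '),
        ((m : Nat) : Int) - 1, ((m : Nat) : Int) + 1)
    = (List.replicate (m - k / 2) ' '
        ++ ((pvEO (d.drop 2)).take (k / 2)).reverse
        ++ [PySem.List.pyGetD d 0 ' ']
        ++ (pvEO (d.drop 1)).take ((k + 1) / 2)
        ++ List.replicate (m - (k + 1) / 2) ' ',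
       (m : Int) - ((k / 2 : Nat) : Int) - 1, (m : Int) + (((k + 1) / 2 : Nat) : Int) + 1) := by
  induction k with
  | zero =>
    rw [PySem.List.pyRange_one_eq_nil (by norm_num)]
    rw [PySem.List.pySetD_of_nonneg _ _ (by positivity)]
    have h1 : ((m : Int)).toNat = m := by omega
    have h2 : d.length = m + (1 + m) := by omega
    rw [h1, h2, List.replicate_add, show (1 + m) = m + 1 by omega, List.replicate_succ]
    have hset := set_append_len (List.replicate m (' ' : Char)) (List.replicate m ' ') ' '
      (PySem.List.pyGetD d 0 ' ')
    simp only [List.length_replicate] at hset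
    rw [hset]
    simp
  | succ k ih =>
    have hk' : k ≤ 2 * m := by omega
    have hm1 : 1 ≤ m := by omega
    have hlen2 : (d.drop 2).length = 2 * m - 1 := by simp [hlen]
    have hlen1 : (d.drop 1).length = 2 * m := by simp [hlen]
    have hEO2len : (pvEO (d.drop 2)).length = m := by rw [pvEO_length, hlen2]; omega
    have hEO1len : (pvEO (d.drop 1)).length = m := by rw [pvEO_length, hlen1]; omega
    rw [show (1 : Int) + ((k + 1 : Nat) : Int) = (1 + (k : Nat)) + 1 by push_cast; ring]
    rw [PySem.List.pyRange_one_succ_right (by omega), List.foldl_append, ih hk']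
    simp only [List.foldl_cons, List.foldl_nil]
    rcases Nat.even_or_odd' k with ⟨e, he | he⟩
    · -- k = 2e, i = k+1 odd: else branch, write at the right pointer
      subst he
      have hem : e < m := by omega
      have hmod : ¬ (PySem.Int.mod (1 + ((2 * e : Nat) : Int)) 2 = 0) := by
        simp [PySem.Int.mod, Int.fmod_eq_emod]; try omega
      simp only [hmod, if_false]
      have q1 : 2 * e / 2 = e := by omega
      have q2 : (2 * e + 1) / 2 = e := by omega
      have q3 : (2 * e + 1 + 1) / 2 = e + 1 := by omega
      rw [q1, q2, q3]
      have hb : 2 * e + 1 < d.length := by omega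
      have hvd : PySem.List.pyGetD d (1 + ((2 * e : Nat) : Int)) ' ' = d[2 * e + 1]'hb := by
        rw [PySem.List.pyGetD_eq_getElem d ' ' (by omega) (by push_cast; omega)]
        congr 1
        omega
      have htake : List.take (e + 1) (pvEO (List.drop 1 d))
          = List.take e (pvEO (List.drop 1 d)) ++ [d[2 * e + 1]'hb] := by
        rw [List.take_add_one, pvEO_getElem?, List.getElem?_drop,
            List.getElem?_eq_getElem (by omega : 1 + 2 * e < d.length)]
        have h12 : 1 + 2 * e = 2 * e + 1 := by omega
        simp [h12]
      rw [PySem.List.pySetD_of_nonneg _ _ (by omega)]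
      have htn : (((m : Int)) + ((e : Nat) : Int) + 1).toNat = m + e + 1 := by omega
      rw [htn]
      set A := List.replicate (m - e) (' ' : Char) ++ (List.take e (pvEO (List.drop 2 d))).reverse ++
          [PySem.List.pyGetD d 0 ' '] ++ List.take e (pvEO (List.drop 1 d)) with hA
      have hEOtail : (pvEO d.tail).length = m := by rw [← List.drop_one]; exact hEO1len
      have hAlen : A.length = m + e + 1 := by
        simp [hA, hEO2len, hEOtail]
        omega
      rw [show m + e + 1 = A.length from hAlen.symm,
          set_repl_suffix A (m - e) ' ' _ (by omega)]
      rw [hvd, htake]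
      refine Prod.ext ?_ (Prod.ext ?_ ?_) <;> (simp [hA, List.append_assoc]; try omega)
    · -- k = 2e+1, i = k+1 even: then branch, write at the left pointer
      subst he
      have hem : e + 1 ≤ m := by omega
      have hmod : PySem.Int.mod (1 + ((2 * e + 1 : Nat) : Int)) 2 = 0 := by
        simp [PySem.Int.mod, Int.fmod_eq_emod]; try omega
      simp only [hmod, if_pos]
      have q1 : (2 * e + 1) / 2 = e := by omega
      have q2 : (2 * e + 1 + 1) / 2 = e + 1 := by omega
      have q3 : (2 * e + 1 + 1 + 1) / 2 = e + 1 := by omega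
      rw [q1, q2, q3]
      have hb : 2 * e + 2 < d.length := by omega
      have hvd : PySem.List.pyGetD d (1 + ((2 * e + 1 : Nat) : Int)) ' ' = d[2 * e + 2]'hb := by
        rw [PySem.List.pyGetD_eq_getElem d ' ' (by omega) (by push_cast; omega)]
        congr 1
        omega
      have htake2 : List.take (e + 1) (pvEO (List.drop 2 d))
          = List.take e (pvEO (List.drop 2 d)) ++ [d[2 * e + 2]'hb] := by
        rw [List.take_add_one, pvEO_getElem?, List.getElem?_drop,
            List.getElem?_eq_getElem (by omega : 2 + 2 * e < d.length)]
        have h22 : 2 + 2 * e = 2 * e + 2 := by omega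
        simp [h22]
      rw [PySem.List.pySetD_of_nonneg _ _ (by omega)]
      have htn : (((m : Int)) - ((e : Nat) : Int) - 1).toNat = m - e - 1 := by omega
      rw [htn, hvd, htake2]
      rw [List.append_assoc, List.append_assoc, List.append_assoc,
          show m - e = (m - e - 1) + 1 by omega]
      simp only [Nat.add_sub_cancel]
      rw [set_repl_prefix]
      refine Prod.ext ?_ (Prod.ext ?_ ?_) <;> (simp [List.append_assoc]; try omega)

-- ===== VERDICT (by name: the statement is the Claim_ definition above) =====
theorem GrovlyeString_spec : Claim_equal_GrovlyeString := by
  unfold Claim_equal_GrovlyeString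
  intro s _ hp
  unfold Pre_GrovlyeString at hp
  unfold Spec_GrovlyeString GrovlyeString GrovlyeString_alt
  simp only []
  set d := PySem.List.sorted s.toList (fun c => c) true with hd
  have hdl : d.length = s.toList.length := PySem.List.length_sorted _ _ _
  obtain ⟨m, hm⟩ : ∃ m, d.length = 2 * m + 1 := ⟨d.length / 2, by omega⟩
  have hmid : PySem.Int.floordiv ((d.length : Int)) 2 = ((m : Nat) : Int) := by
    rw [hm]
    simp [PySem.Int.floordiv, Int.fdiv_eq_ediv]
    omega
  rw [hmid, show ((d.length : Nat) : Int) = 1 + ((2 * m : Nat) : Int) by rw [hm]; push_cast; ring]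
  rw [show (1 : Int) + ((2 * m : Nat) : Int) = 1 + ((2 * m : Nat) : Int) from rfl]
  rw [loop_inv d m hm (2 * m) le_rfl]
  have hEO2len : (pvEO (d.drop 2)).length = m := by
    rw [pvEO_length]
    simp [hm]
    omega
  have hEO1len : (pvEO (d.drop 1)).length = m := by
    rw [pvEO_length]
    simp [hm]
    omega
  have hs2 : PySem.List.slice? d (some 2) none 2 = some (pvEO (d.drop 2)) := by
    have h := slice2_eq_pvEO d 2
    norm_num at h
    exact h
  have hs1 : PySem.List.slice? d (some 1) none 2 = some (pvEO (d.drop 1)) := by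
    have h := slice2_eq_pvEO d 1
    norm_num at h
    rw [← List.drop_one] at h
    exact h
  rw [hs2, hs1]
  have q1 : 2 * m / 2 = m := by omega
  have q2 : (2 * m + 1) / 2 = m := by omega
  rw [q1, q2]
  rw [List.take_of_length_le (le_of_eq hEO2len), List.take_of_length_le (le_of_eq hEO1len)]
  simp
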